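-- pv_equiv track=rewrite | github.com/pdelfino/numerical-analysis | lista-1/4-no-convergence.py | get_diagonal
-- ===== SOURCE A (Python) =====
-- def make_squared_matrix(n):
--
--     squared_matrix = []
--
--     for i in range(0,n):
--
--         lines_list = []
--
--         for i in range(0,n):
--
--             lines_list.append(0)
--
--         squared_matrix.append(lines_list)
--
--     return squared_matrix
--
-- def get_diagonal(matrix):
--
--     diagonal_matrix = make_squared_matrix(len(matrix))
--
--     diagonal_val = []
--
--     for i in range(0,len(matrix)):
--         diagonal_val.append(matrix[i][i])
--
--     counter = 0
--
--     for linha in diagonal_matrix: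
--         diagonal_matrix[counter][counter]=diagonal_val[counter]
--
--         counter += 1
--
--     return diagonal_matrix
-- ===== SOURCE B (Python) =====
-- def get_diagonal(matrix):
--     n = len(matrix)
--
--     def rows(i):
--         if i >= n:
--             return []
--         return [[0] * i + [matrix[i][i]] + [0] * (n - 1 - i)] + rows(i + 1)
--
--     return rows(0)
-- ===== Notes on version B (the rewrite author's own statement) =====
-- stated objective: alternative
-- what changed: B recurses over the row index and assembles each row directly from zero blocks ([0]*i + [matrix[i][i]] + [0]*(n-1-i)), so there is no pre-built zero matrix, no intermediate diagonal list and no overwrite pass.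
import Mathlib
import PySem

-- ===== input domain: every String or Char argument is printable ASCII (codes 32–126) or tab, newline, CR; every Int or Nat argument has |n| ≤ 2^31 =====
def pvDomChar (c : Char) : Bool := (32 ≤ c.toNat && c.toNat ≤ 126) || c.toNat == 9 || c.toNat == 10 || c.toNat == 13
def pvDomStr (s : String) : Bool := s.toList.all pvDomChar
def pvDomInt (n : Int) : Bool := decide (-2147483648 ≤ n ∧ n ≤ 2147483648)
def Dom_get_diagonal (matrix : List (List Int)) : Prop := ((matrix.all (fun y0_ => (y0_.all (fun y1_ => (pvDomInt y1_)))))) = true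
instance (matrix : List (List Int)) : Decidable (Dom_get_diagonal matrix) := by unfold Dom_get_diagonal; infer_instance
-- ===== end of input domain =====

-- B recurses over the row index and assembles each row directly from zero blocks,
-- removing A's zero-matrix construction, diagonal list and overwrite pass (objective: alternative).

-- ===== PORT A =====
def make_squared_matrix (n : Int) : List (List Int) :=
  (PySem.List.pyRange 0 n 1).foldl
    (fun squared_matrix _ =>
      squared_matrix ++
        [(PySem.List.pyRange 0 n 1).foldl (fun lines_list _ => lines_list ++ [(0 : Int)]) []])
    []

def get_diagonal (matrix : List (List Int)) : List (List Int) :=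
  let diagonal_matrix := make_squared_matrix (matrix.length : Int)
  let diagonal_val := (PySem.List.pyRange 0 (matrix.length : Int) 1).foldl
    (fun acc i => acc ++ [PySem.List.pyGetD (PySem.List.pyGetD matrix i []) i 0]) []
  -- reads/writes are total via pyGetD/pySetD; exact inside Pre_, where every index is in range
  (diagonal_matrix.foldl
    (fun (st : List (List Int) × Int) _ =>
      (PySem.List.pySetD st.1 st.2
         (PySem.List.pySetD (PySem.List.pyGetD st.1 st.2 []) st.2
            (PySem.List.pyGetD diagonal_val st.2 0)),
       st.2 + 1))
    (diagonal_matrix, 0)).1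

-- ===== PORT B =====
-- the inner recursive helper 'rows' of Source B (recursion on the row index up to n)
def get_diagonal_alt_rows (matrix : List (List Int)) (n : Nat) (i : Nat) : List (List Int) :=
  if n ≤ i then []
  else (List.replicate i (0 : Int) ++
          [PySem.List.pyGetD (PySem.List.pyGetD matrix (i : Int) []) (i : Int) 0] ++
          List.replicate (n - 1 - i) (0 : Int))
       :: get_diagonal_alt_rows matrix n (i + 1)
termination_by n - i
decreasing_by omega

def get_diagonal_alt (matrix : List (List Int)) : List (List Int) :=
  get_diagonal_alt_rows matrix matrix.length 0

-- ===== PRECONDITION & SPEC =====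
-- Pre_ excludes exactly the matrices on which Python A raises IndexError (some row i has
-- length ≤ i, so matrix[i][i] fails); B's Python raises there too.
def Pre_get_diagonal (matrix : List (List Int)) : Prop :=
  ∀ i, i < matrix.length → i < (matrix.getD i []).length
instance (matrix : List (List Int)) : Decidable (Pre_get_diagonal matrix) := by
  unfold Pre_get_diagonal; infer_instance

def pvWitness_get_diagonal : List (List Int) := [[1, 2], [3, 4]]

def Spec_get_diagonal (matrix : List (List Int)) (out : List (List Int)) : Prop := out = get_diagonal_alt matrix
instance (matrix : List (List Int)) (out : List (List Int)) : Decidable (Spec_get_diagonal matrix out) := by unfold Spec_get_diagonal; infer_instance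

-- ===== CLAIM (what is proved, stated in full; the proofs are below) =====
def Claim_equal_get_diagonal : Prop := ∀ (matrix : List (List Int)), Dom_get_diagonal matrix → Pre_get_diagonal matrix → Spec_get_diagonal matrix (get_diagonal matrix)

-- ===== LEMMAS AND PROOFS =====

-- A's diagonal value read, as a function of the row index
def pvDiag (matrix : List (List Int)) (i : Nat) : Int :=
  PySem.List.pyGetD (PySem.List.pyGetD matrix (i : Int) []) (i : Int) 0

-- the matrix after the first m overwrite steps of A's final loop
def pvStage (matrix : List (List Int)) (m : Nat) : List (List Int) :=
  (List.range matrix.length).map (fun i =>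
    (List.range matrix.length).map (fun j =>
      if i = j ∧ i < m then pvDiag matrix i else 0))

-- one overwrite step of A's final loop
def pvG (matrix : List (List Int)) (L : List (List Int)) (c : Int) : List (List Int) :=
  PySem.List.pySetD L c
    (PySem.List.pySetD (PySem.List.pyGetD L c []) c
      (PySem.List.pyGetD ((List.range matrix.length).map (pvDiag matrix)) c 0))

theorem pv_foldl_append_const {α β : Type} (l : List α) (a : List β) (c : β) :
    l.foldl (fun s _ => s ++ [c]) a = a ++ List.replicate l.length c := by
  induction l generalizing a with
  | nil => simp
  | cons x xs ih => simp [ih, List.replicate_succ]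

theorem pv_foldl_append_map {α β : Type} (l : List α) (a : List β) (f : α → β) :
    l.foldl (fun s x => s ++ [f x]) a = a ++ l.map f := by
  induction l generalizing a with
  | nil => simp
  | cons x xs ih => simp [ih]

theorem pv_msm (n : Nat) :
    make_squared_matrix (n : Int) = List.replicate n (List.replicate n (0 : Int)) := by
  unfold make_squared_matrix
  rw [pv_foldl_append_const, pv_foldl_append_const]
  simp [PySem.List.length_pyRange_one]

theorem pv_dval (matrix : List (List Int)) :
    (PySem.List.pyRange 0 (matrix.length : Int) 1).foldl
      (fun acc i => acc ++ [PySem.List.pyGetD (PySem.List.pyGetD matrix i []) i 0]) []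
    = (List.range matrix.length).map (pvDiag matrix) := by
  rw [pv_foldl_append_map, PySem.List.pyRange_one]
  simp [List.map_map, pvDiag, Function.comp]

-- generic shape of A's counter loop
theorem pv_loop_shape {α β : Type} (g : β → Int → β) (l : List α) (L : β) (c : Int) :
    (l.foldl (fun st _ => (g st.1 st.2, st.2 + 1)) (L, c))
      = ((List.range l.length).foldl (fun (L' : β) (k : Nat) => g L' (c + (k : Int))) L,
         c + l.length) := by
  induction l generalizing L c with
  | nil => simp
  | cons x xs ih =>
      simp only [List.foldl_cons, ih, List.length_cons]
      rw [List.range_succ_eq_map]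
      simp only [List.foldl_cons, List.foldl_map, Nat.cast_zero, add_zero]
      have h : (fun (L' : β) (k : Nat) => g L' (c + 1 + (k : Int)))
             = (fun (L' : β) (k : Nat) => g L' (c + ((k : Nat).succ : Int))) := by
        funext L' k; push_cast; ring_nf
      rw [h, Prod.mk.injEq]
      refine ⟨rfl, by push_cast; ring⟩

theorem pv_stage_zero (matrix : List (List Int)) :
    pvStage matrix 0 = List.replicate matrix.length (List.replicate matrix.length (0 : Int)) := by
  unfold pvStage
  simp

theorem pv_step (matrix : List (List Int)) (m : Nat) (hm : m < matrix.length) :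
    pvG matrix (pvStage matrix m) (m : Int) = pvStage matrix (m + 1) := by
  unfold pvG pvStage
  simp only [PySem.List.pySetD_natCast, PySem.List.pyGetD_natCast]
  rw [List.getD_eq_getElem _ _ (by simpa using hm : m < ((List.range matrix.length).map (fun i =>
        (List.range matrix.length).map (fun j =>
          if i = j ∧ i < m then pvDiag matrix i else 0))).length)]
  rw [List.getD_eq_getElem _ _ (by simpa using hm :
        m < ((List.range matrix.length).map (pvDiag matrix)).length)]
  simp only [List.getElem_map, List.getElem_range]
  apply List.ext_getElem
  · simp
  · intro i h1 h2
    simp only [List.length_set, List.length_map, List.length_range] at h1 h2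
    rw [List.getElem_set]
    by_cases hi : m = i
    · subst hi
      simp only [if_true, List.getElem_map, List.getElem_range]
      apply List.ext_getElem
      · simp
      · intro j hj1 hj2
        simp only [List.length_map, List.length_range] at hj1 hj2
        rw [List.getElem_set]
        simp only [List.getElem_map, List.getElem_range]
        split_ifs <;> first | rfl | omega
    · simp only [if_neg hi, List.getElem_map, List.getElem_range]
      apply List.ext_getElem
      · simp
      · intro j hj1 hj2
        simp only [List.getElem_map, List.getElem_range]
        split_ifs <;> first | rfl | omega

theorem pv_fold (matrix : List (List Int)) (m : Nat) (hm : m ≤ matrix.length) :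
    (List.range m).foldl (fun (L : List (List Int)) (k : Nat) => pvG matrix L ((0 : Int) + (k : Int)))
        (pvStage matrix 0)
      = pvStage matrix m := by
  induction m with
  | zero => simp
  | succ m ih =>
      rw [List.range_succ, List.foldl_append]
      rw [ih (Nat.le_of_succ_le hm)]
      simp only [List.foldl_cons, List.foldl_nil, zero_add]
      exact pv_step matrix m (Nat.lt_of_succ_le hm)

theorem pv_a_eq_stage (matrix : List (List Int)) :
    get_diagonal matrix = pvStage matrix matrix.length := by
  simp only [get_diagonal]
  rw [pv_msm, pv_dval]
  have hbody : (fun (st : List (List Int) × Int) (_ : List Int) =>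
      (PySem.List.pySetD st.1 st.2
         (PySem.List.pySetD (PySem.List.pyGetD st.1 st.2 []) st.2
            (PySem.List.pyGetD ((List.range matrix.length).map (pvDiag matrix)) st.2 0)),
       st.2 + 1))
      = (fun (st : List (List Int) × Int) (_ : List Int) => (pvG matrix st.1 st.2, st.2 + 1)) := by
    funext st x
    rfl
  rw [hbody, pv_loop_shape (pvG matrix)]
  simp only [List.length_replicate]
  rw [← pv_stage_zero, pv_fold matrix matrix.length le_rfl]

-- B's row i, written as the range-map form of pvStage's row
theorem pv_row (n i : Nat) (d : Int) (hi : i < n) :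
    List.replicate i (0 : Int) ++ [d] ++ List.replicate (n - 1 - i) (0 : Int)
      = (List.range n).map (fun j => if i = j then d else 0) := by
  apply List.ext_getElem
  · simp; omega
  · intro k h1 h2
    simp only [List.length_map, List.length_range] at h2
    simp only [List.getElem_map, List.getElem_range]
    rcases Nat.lt_trichotomy k i with hk | hk | hk
    · rw [List.getElem_append_left (by simp; omega),
          List.getElem_append_left (by simpa using hk),
          List.getElem_replicate, if_neg (by omega)]
    · subst hk
      rw [List.getElem_append_left (by simp),
          List.getElem_append_right (by simp)]
      simp
    · rw [List.getElem_append_right (by simp; omega), List.getElem_replicate,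
          if_neg (by omega)]

theorem pv_rows_eq (matrix : List (List Int)) (n : Nat) (i : Nat) :
    get_diagonal_alt_rows matrix n i
      = ((List.range n).drop i).map (fun r =>
          (List.range n).map (fun j => if r = j ∧ r < n then pvDiag matrix r else 0)) := by
  generalize hk : n - i = k
  induction k generalizing i with
  | zero =>
      rw [get_diagonal_alt_rows, if_pos (by omega),
          List.drop_eq_nil_of_le (by simp; omega)]
      rfl
  | succ k ih =>
      have hi' : i < n := by omega
      rw [get_diagonal_alt_rows, if_neg (by omega)]
      have hdrop : (List.range n).drop i = i :: (List.range n).drop (i + 1) := by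
        rw [List.drop_eq_getElem_cons (by simpa using hi')]
        simp
      rw [hdrop, List.map_cons, ih (i + 1) (by omega)]
      refine congrArg₂ List.cons ?_ rfl
      rw [show PySem.List.pyGetD (PySem.List.pyGetD matrix (i : Int) []) (i : Int) 0 = pvDiag matrix i from rfl,
          pv_row n i (pvDiag matrix i) hi']
      apply List.map_congr_left
      intro j hj
      by_cases hij : i = j
      · simp [hij, hij ▸ hi']
      · simp [hij]

theorem pv_alt_eq_stage (matrix : List (List Int)) :
    get_diagonal_alt matrix = pvStage matrix matrix.length := by
  rw [get_diagonal_alt, pv_rows_eq, pvStage]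
  simp

-- ===== VERDICT (by name: the statement is the Claim_ definition above) =====
theorem get_diagonal_spec : Claim_equal_get_diagonal := by
  intro matrix _ _
  unfold Spec_get_diagonal
  rw [pv_a_eq_stage, pv_alt_eq_stage]
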